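-- pv_equiv track=rewrite | github.com/Msangwool/Algorithm | 프로그래머스/0/181918. 배열 만들기 4/배열 만들기 4.py | solution
-- ===== SOURCE A (Python) =====
-- def solution(arr):
--     i = 0
--     stk = []
--     while i < len(arr):
--         if not stk:
--             stk.append(arr[i])
--             i = i + 1
--             continue
--
--         if stk[-1] < arr[i]:
--             stk.append(arr[i])
--             i = i + 1
--             continue
--
--         stk.pop()
--     return stk
-- ===== SOURCE B (Python) =====
-- def solution(arr):
--     # An element survives A's stack iff it is strictly below every element to
--     # its right.  One reverse pass with an explicit running minimum m.
--     out = []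
--     m = None
--     for x in reversed(arr):
--         if m is None or x < m:
--             out.append(x)
--             m = x
--     return out[::-1]
-- ===== Notes on version B (the rewrite author's own statement) =====
-- stated objective: faster
-- what changed: Replaces the pop-on-conflict stack simulation (which revisits elements on each pop) by a single reverse scan with an explicit running suffix minimum: an element is kept exactly when it is strictly below the minimum of everything to its right.
import Mathlib
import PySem

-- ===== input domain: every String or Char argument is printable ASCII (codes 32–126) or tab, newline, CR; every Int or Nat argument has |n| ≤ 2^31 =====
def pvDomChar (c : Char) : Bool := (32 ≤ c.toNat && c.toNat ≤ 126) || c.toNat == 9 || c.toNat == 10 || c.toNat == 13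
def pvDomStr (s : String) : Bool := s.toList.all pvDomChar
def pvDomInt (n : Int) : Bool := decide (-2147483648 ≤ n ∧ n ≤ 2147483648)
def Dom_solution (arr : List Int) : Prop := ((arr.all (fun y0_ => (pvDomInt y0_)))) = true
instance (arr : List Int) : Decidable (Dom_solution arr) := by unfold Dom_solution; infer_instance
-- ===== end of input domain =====

-- B replaces A's stack simulation by one reverse scan with an explicit running suffix minimum.

-- ===== PORT A =====
-- A's while loop: the stack is kept top-first (Lean head = Python stk[-1]); returning
-- the Python stack bottom-first is the final .reverse.
def solGoA (rest stk : List Int) : List Int :=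
  match rest, stk with
  | [], stk => stk.reverse
  | x :: r, [] => solGoA r [x]
  | x :: r, t :: s => if t < x then solGoA r (x :: t :: s) else solGoA (x :: r) (s)
termination_by 2 * rest.length + stk.length

def solution (arr : List Int) : List Int := solGoA arr []

-- ===== PORT B =====
-- Source B's loop body: state = (out so far, running minimum m : Option Int).
def altStep (st : List Int × Option Int) (x : Int) : List Int × Option Int :=
  match st.2 with
  | none => (st.1 ++ [x], some x)
  | some m => if x < m then (st.1 ++ [x], some x) else st

def solution_alt (arr : List Int) : List Int :=
  (arr.reverse.foldl altStep ([], none)).1.reverse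

-- ===== PRECONDITION & SPEC =====
def Spec_solution (arr : List Int) (out : List Int) : Prop := out = solution_alt arr
instance (arr : List Int) (out : List Int) : Decidable (Spec_solution arr out) := by unfold Spec_solution; infer_instance

-- ===== CLAIM (what is proved, stated in full; the proofs are below) =====
def Claim_equal_solution : Prop := ∀ (arr : List Int), Dom_solution arr → Spec_solution arr (solution arr)

-- ===== LEMMAS AND PROOFS =====

-- Right-to-left characterisation: keep x iff it is strictly below the head
-- (= minimum) of the kept suffix.
def Kstep (x : Int) (k : List Int) : List Int :=
  match k with
  | [] => [x]
  | h :: t => if x < h then x :: h :: t else h :: t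

def K : List Int → List Int
  | [] => []
  | x :: r => Kstep x (K r)

lemma K_cons_ne_nil (x : Int) (r : List Int) : K (x :: r) ≠ [] := by
  simp only [K, Kstep]
  cases K r with
  | nil => simp
  | cons h t => by_cases hx : x < h <;> simp [hx]

lemma K_head_min (r : List Int) (h : Int) (t : List Int) (hK : K r = h :: t) :
    h ∈ r ∧ ∀ y ∈ r, h ≤ y := by
  induction r generalizing h t with
  | nil => simp [K] at hK
  | cons x r ih =>
    simp only [K, Kstep] at hK
    cases hKr : K r with
    | nil =>
      rw [hKr] at hK
      cases r with
      | nil =>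
        simp at hK
        simp [hK.1]
      | cons a b => exact absurd hKr (K_cons_ne_nil a b)
    | cons h' t' =>
      rw [hKr] at hK
      obtain ⟨hmem, hmin⟩ := ih h' t' hKr
      by_cases hx : x < h'
      · simp only [hx, if_true] at hK
        have hhx : h = x := by injection hK with h1 _; omega
        subst hhx
        refine ⟨List.mem_cons_self, ?_⟩
        intro y hy
        rcases List.mem_cons.mp hy with hy | hy
        · omega
        · have := hmin y hy; omega
      · simp only [hx, if_false] at hK
        have hhx : h = h' := by injection hK with h1 _; omega
        subst hhx
        refine ⟨List.mem_cons_of_mem _ hmem, ?_⟩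
        intro y hy
        rcases List.mem_cons.mp hy with hy | hy
        · omega
        · exact hmin y hy

-- K's step expressed with a boolean "x strictly below all of r" test.
lemma K_step (x : Int) (r : List Int) :
    K (x :: r) = if r.all (fun y => decide (x < y)) then x :: K r else K r := by
  simp only [K, Kstep]
  cases hKr : K r with
  | nil =>
    have hr : r = [] := by
      cases r with
      | nil => rfl
      | cons a b => exact absurd hKr (K_cons_ne_nil a b)
    subst hr
    simp
  | cons h t =>
    obtain ⟨hmem, hmin⟩ := K_head_min r h t hKr
    by_cases hall : ∀ y ∈ r, x < y
    · have hx : x < h := hall h hmem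
      change (if x < h then x :: h :: t else h :: t) = _
      rw [if_pos hx, if_pos]
      simp only [List.all_eq_true, decide_eq_true_eq]
      exact hall
    · push Not at hall
      obtain ⟨y, hy, hxy⟩ := hall
      have hx : ¬ x < h := by have := hmin y hy; omega
      change (if x < h then x :: h :: t else h :: t) = _
      rw [if_neg hx, if_neg]
      simp only [List.all_eq_true, decide_eq_true_eq]
      push Not
      exact ⟨y, hy, hxy⟩

-- B's fold state after consuming arr (reversed) is exactly (K arr reversed, head of K arr).
lemma foldl_altStep_eq (arr : List Int) :
    arr.reverse.foldl altStep ([], none) = ((K arr).reverse, (K arr).head?) := by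
  induction arr with
  | nil => simp [K]
  | cons x r ih =>
    rw [List.reverse_cons, List.foldl_append, ih]
    simp only [List.foldl_cons, List.foldl_nil, K]
    cases hKr : K r with
    | nil =>
      have hr : r = [] := by
        cases r with
        | nil => rfl
        | cons a b => exact absurd hKr (K_cons_ne_nil a b)
      subst hr
      simp [altStep, Kstep]
    | cons h t =>
      by_cases hx : x < h <;> simp [altStep, Kstep, hx]

lemma alt_eq_K (arr : List Int) : solution_alt arr = K arr := by
  unfold solution_alt
  rw [foldl_altStep_eq]
  simp

-- Main invariant for A's stack loop.
lemma solGoA_eq (rest : List Int) : ∀ stk : List Int, stk.Pairwise (fun a b => b < a) →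
    solGoA rest stk =
      (stk.filter (fun u => rest.all (fun y => decide (u < y)))).reverse ++ K rest := by
  induction rest with
  | nil =>
    intro stk _
    simp [solGoA, K, List.filter_eq_self.mpr]
  | cons x r ih =>
    intro stk
    induction stk with
    | nil =>
      intro _
      rw [solGoA, ih [x] (by simp), K_step]
      by_cases hall : (r.all (fun y => decide (x < y))) = true
      · simp [hall]
      · have hall' : (r.all (fun y => decide (x < y))) = false :=
          Bool.eq_false_iff.mpr hall
        simp [hall']
    | cons t s ihs =>
      intro hp
      have hps : s.Pairwise (fun a b => b < a) := hp.tail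
      have hts : ∀ u ∈ s, u < t := fun u hu => List.rel_of_pairwise_cons hp hu
      rw [solGoA]
      by_cases htx : t < x
      · rw [if_pos htx]
        have hpx : (x :: t :: s).Pairwise (fun a b => b < a) := by
          refine List.pairwise_cons.mpr ⟨?_, hp⟩
          intro u hu
          rcases List.mem_cons.mp hu with h | h
          · omega
          · have := hts u h; omega
        rw [ih (x :: t :: s) hpx]
        have hfilter : (t :: s).filter (fun u => (x :: r).all (fun y => decide (u < y)))
            = (t :: s).filter (fun u => r.all (fun y => decide (u < y))) := by
          apply List.filter_congr
          intro u hu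
          have hlt : u < x := by
            rcases List.mem_cons.mp hu with h | h
            · omega
            · have := hts u h; omega
          simp [hlt]
        rw [K_step, hfilter]
        by_cases hall : (r.all (fun y => decide (x < y))) = true
        · rw [if_pos hall]
          simp [List.filter_cons, hall]
        · rw [if_neg hall]
          have hall' : (r.all (fun y => decide (x < y))) = false :=
            Bool.eq_false_iff.mpr hall
          simp [List.filter_cons, hall']
      · rw [if_neg htx]
        rw [ihs hps]
        have hft : ((x :: r).all (fun y => decide (t < y))) = false := by
          simp only [List.all_cons, Bool.and_eq_false_iff]
          left; simpa using htx
        rw [List.filter_cons, hft]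
        simp

-- ===== VERDICT (by name: the statement is the Claim_ definition above) =====
theorem solution_spec : Claim_equal_solution := by
  intro arr _
  unfold Spec_solution solution
  rw [solGoA_eq arr [] (by simp), alt_eq_K]
  simp
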